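-- pv_equiv track=rewrite | github.com/shakyasaijal/Google-Foobar-Challenge | find-the-access-codes.py | solution
-- ===== SOURCE A (Python) =====
-- def validation(l):
--     if len(l) < 2 or len(l) > 2000 or min(l) < 1 or max(l) > 999999:
--         return False
--     return True
--
-- def solution(l):
--     if not validation(l):
--         return 0
--
--     cnt = 0
--     for i in range(1, len(l) - 1):
--         cnt_x = len([x for x in l[:i] if l[i] % x == 0])
--         cnt_z = len([z for z in l[i + 1:] if z % l[i] == 0])
--
--         cnt += cnt_x * cnt_z
--     return cnt
-- ===== SOURCE B (Python) =====
-- def solution(l):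
--     n = len(l)
--     if not (2 <= n <= 2000 and min(l) >= 1 and max(l) <= 999999):
--         return 0
--     # pairs[j] = number of earlier indices i < j with l[i] dividing l[j]
--     pairs = []
--     for j in range(n):
--         c = 0
--         for i in range(j):
--             if l[j] % l[i] == 0:
--                 c += 1
--         pairs.append(c)
--     # extend every divisor pair (j, k) by the number of valid first elements
--     total = 0
--     for k in range(n):
--         for j in range(k):
--             if l[k] % l[j] == 0:
--                 total += pairs[j]
--     return total
-- ===== Notes on version B (the rewrite author's own statement) =====
-- stated objective: alternative
-- what changed: Replaces A's per-middle-element product of two slice-filter counts by a precomputed table pairs[j] of earlier-divisor counts, then counts triples by extending every divisor pair (j,k) with pairs[j] additively; no slices and no multiplication.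
import Mathlib
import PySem

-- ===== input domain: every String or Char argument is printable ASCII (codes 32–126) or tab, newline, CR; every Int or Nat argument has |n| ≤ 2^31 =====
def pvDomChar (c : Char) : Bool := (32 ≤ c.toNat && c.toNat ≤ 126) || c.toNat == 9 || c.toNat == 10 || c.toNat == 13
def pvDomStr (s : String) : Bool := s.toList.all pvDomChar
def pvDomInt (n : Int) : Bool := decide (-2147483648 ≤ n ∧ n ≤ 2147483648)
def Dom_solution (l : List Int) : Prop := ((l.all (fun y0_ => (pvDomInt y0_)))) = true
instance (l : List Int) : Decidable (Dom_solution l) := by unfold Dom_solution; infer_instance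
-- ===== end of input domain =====

-- B replaces A's per-middle product of slice-filter counts by a pair-count table extended over divisor pairs (alternative decomposition, same O(n^2) cost).


-- ===== PORT A =====
def validation (l : List Int) : Bool :=
  if decide (l.length < 2) || decide (l.length > 2000)
      || (match PySem.List.min? l (fun x => x) with | some m => decide (m < 1) | none => false)
      || (match PySem.List.max? l (fun x => x) with | some m => decide (m > 999999) | none => false)
  then false else true

def solution (l : List Int) : Int :=
  if !(validation l) then 0
  else
    (PySem.List.pyRange 1 ((l.length : Int) - 1) 1).foldl (fun cnt i =>
      let cnt_x := ((PySem.List.slice l none (some i)).filter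
        (fun x => PySem.Int.mod (PySem.List.pyGetD l i 0) x == 0)).length
      let cnt_z := ((PySem.List.slice l (some (i + 1)) none).filter
        (fun z => PySem.Int.mod z (PySem.List.pyGetD l i 0) == 0)).length
      cnt + (cnt_x : Int) * (cnt_z : Int)) 0

-- ===== PORT B =====
def solution_alt (l : List Int) : Int :=
  let n := l.length
  if !(decide (2 ≤ n) && decide (n ≤ 2000)
       && (match PySem.List.min? l (fun x => x) with | some m => decide (1 ≤ m) | none => false)
       && (match PySem.List.max? l (fun x => x) with | some m => decide (m ≤ 999999) | none => false))
  then 0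
  else
    let pairs : List Int := (List.range n).foldl (fun pairs j =>
      pairs ++ [(List.range j).foldl (fun c i =>
        if PySem.Int.mod (l.getD j 0) (l.getD i 0) == 0 then c + 1 else c) (0 : Int)]) []
    (List.range n).foldl (fun tot k =>
      (List.range k).foldl (fun tot j =>
        if PySem.Int.mod (l.getD k 0) (l.getD j 0) == 0 then tot + pairs.getD j 0 else tot) tot) 0

-- ===== PRECONDITION & SPEC =====
def Spec_solution (l : List Int) (out : Int) : Prop := out = solution_alt l
instance (l : List Int) (out : Int) : Decidable (Spec_solution l out) := by unfold Spec_solution; infer_instance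

-- ===== CLAIM (what is proved, stated in full; the proofs are below) =====
def Claim_equal_solution : Prop := ∀ (l : List Int), Dom_solution l → Spec_solution l (solution l)

-- ===== LEMMAS AND PROOFS =====

-- cnt1 l j k = 1 iff l[j] divides l[k] (Python %): the elementary building block of a lucky triple
def cnt1 (l : List Int) (j k : Nat) : Int :=
  if PySem.Int.mod (l.getD k 0) (l.getD j 0) == 0 then 1 else 0

-- fP l j = number of indices i < j with l[i] dividing l[j]; gP l j = number of k > j with l[j] dividing l[k]
def fP (l : List Int) (j : Nat) : Int := ∑ i ∈ Finset.range j, cnt1 l i j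
def gP (l : List Int) (j : Nat) : Int := ∑ k ∈ Finset.Ico (j + 1) l.length, cnt1 l j k

theorem sum_range_int (m : Nat) (F : Nat → Int) :
    ∑ i ∈ Finset.range m, F i = ((List.range m).map F).sum := rfl

theorem countP_take (xs : List Int) (p : Int → Bool) (j : Nat) (hj : j ≤ xs.length) :
    ((xs.take j).countP p : Int) = ∑ i ∈ Finset.range j, (if p (xs.getD i 0) then (1:Int) else 0) := by
  induction j with
  | zero => simp
  | succ m ih =>
    rw [List.take_add_one, List.countP_append, Finset.sum_range_succ, ← ih (by omega)]
    have hm : m < xs.length := by omega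
    simp [List.getElem?_eq_getElem hm, List.getD_eq_getElem?_getD, List.countP_cons]

theorem countP_drop (xs : List Int) (p : Int → Bool) (m : Nat) (hm : m ≤ xs.length) :
    ((xs.drop m).countP p : Int) = ∑ k ∈ Finset.Ico m xs.length, (if p (xs.getD k 0) then (1:Int) else 0) := by
  have hsplit : xs.countP p = (xs.take m).countP p + (xs.drop m).countP p := by
    conv_lhs => rw [← List.take_append_drop m xs]
    rw [List.countP_append]
  have h1 := countP_take xs p xs.length le_rfl
  rw [List.take_length] at h1
  rw [Finset.sum_Ico_eq_sub _ hm, ← h1, ← countP_take xs p m hm]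
  omega

-- loop shape of B's pair-extension phase: conditional accumulation of a table value
theorem foldl_if_add (p : Nat → Bool) (v : Nat → Int) (L : List Nat) (a : Int) :
    L.foldl (fun t j => if p j then t + v j else t) a
      = a + (L.map (fun j => if p j then v j else 0)).sum := by
  induction L generalizing a with
  | nil => simp
  | cons x t ih => simp only [List.foldl_cons, List.map_cons, List.sum_cons, ih]; split_ifs <;> ring

theorem triangle (n : Nat) (h : Nat → Nat → Int) :
    ∑ j ∈ Finset.range n, ∑ k ∈ Finset.Ico (j+1) n, h j k
      = ∑ k ∈ Finset.range n, ∑ j ∈ Finset.range k, h j k := by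
  have e1 : ∀ j, j < n → (Finset.Ico (j+1) n) = (Finset.range n).filter (fun k => j < k) := by
    intro j hj; ext k; simp [Finset.mem_filter]; omega
  have e2 : ∀ k, k < n → (Finset.range k) = (Finset.range n).filter (fun j => j < k) := by
    intro k hk; ext j; simp [Finset.mem_filter]; omega
  rw [Finset.sum_congr rfl (fun j hj => by
    rw [e1 j (Finset.mem_range.mp hj), Finset.sum_filter])]
  rw [Finset.sum_comm]
  exact Finset.sum_congr rfl (fun k hk => by
    rw [e2 k (Finset.mem_range.mp hk), Finset.sum_filter])

theorem fP_eq_countP (l : List Int) (j : Nat) :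
    fP l j = ((List.range j).countP (fun i => PySem.Int.mod (l.getD j 0) (l.getD i 0) == 0) : Int) := by
  rw [fP, sum_range_int, ← PySem.List.sum_map_ite_one_zero]
  rfl

-- the triple count as a double sum: common value of both programs' counting phases
theorem common_sum (l : List Int) :
    ∑ k ∈ Finset.range l.length, ∑ j ∈ Finset.range k,
        (if PySem.Int.mod (l.getD k 0) (l.getD j 0) == 0 then fP l j else 0)
      = ∑ j ∈ Finset.range l.length, fP l j * gP l j := by
  rw [← triangle]
  refine Finset.sum_congr rfl (fun j _ => ?_)
  rw [gP, Finset.mul_sum]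
  refine Finset.sum_congr rfl (fun k _ => ?_)
  rw [cnt1]
  split_ifs <;> ring

theorem A_body (l : List Int) (h2 : 2 ≤ l.length) :
    (PySem.List.pyRange 1 ((l.length : Int) - 1) 1).foldl (fun cnt i =>
      let cnt_x := ((PySem.List.slice l none (some i)).filter
        (fun x => PySem.Int.mod (PySem.List.pyGetD l i 0) x == 0)).length
      let cnt_z := ((PySem.List.slice l (some (i + 1)) none).filter
        (fun z => PySem.Int.mod z (PySem.List.pyGetD l i 0) == 0)).length
      cnt + (cnt_x : Int) * (cnt_z : Int)) 0
    = ∑ j ∈ Finset.range l.length, fP l j * gP l j := by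
  rw [PySem.List.pyRange_one, List.foldl_map]
  simp only [PySem.List.foldl_add, zero_add]
  have hm : ((l.length : Int) - 1 - 1).toNat = l.length - 2 := by omega
  rw [hm, ← sum_range_int]
  have hrhs : ∑ j ∈ Finset.range l.length, fP l j * gP l j
      = ∑ k ∈ Finset.range (l.length - 2), fP l (1+k) * gP l (1+k) := by
    have h1 : ∑ k ∈ Finset.range (l.length - 2), fP l (1+k) * gP l (1+k)
        = ∑ j ∈ Finset.Ico 1 (l.length - 1), fP l j * gP l j := by
      rw [Finset.sum_Ico_eq_sum_range]
      have : l.length - 1 - 1 = l.length - 2 := by omega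
      rw [this]
    rw [h1]
    refine (Finset.sum_subset ?_ ?_).symm
    · intro j hj
      simp only [Finset.mem_Ico] at hj
      simp only [Finset.mem_range]
      omega
    · intro j hj hnot
      simp only [Finset.mem_range] at hj
      simp only [Finset.mem_Ico, not_and, not_lt] at hnot
      by_cases h0 : j = 0
      · subst h0; simp [fP]
      · have : j = l.length - 1 := by omega
        subst this
        have : l.length - 1 + 1 = l.length := by omega
        simp [gP, this]
  rw [hrhs]
  refine Finset.sum_congr rfl (fun k hk => ?_)
  have hk2 : k < l.length - 2 := Finset.mem_range.mp hk
  have hcast : (1:Int) + (k:Int) = ((1+k : Nat) : Int) := by push_cast; ring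
  rw [hcast, PySem.List.pyGetD_natCast, PySem.List.slice_to_natCast]
  have hcast2 : ((1+k : Nat) : Int) + 1 = ((1+k+1 : Nat) : Int) := by push_cast; ring
  rw [hcast2, PySem.List.slice_from_natCast]
  rw [← List.countP_eq_length_filter, ← List.countP_eq_length_filter]
  rw [countP_take l _ (1+k) (by omega), countP_drop l _ (1+k+1) (by omega)]
  rw [fP, gP]
  rfl

theorem B_body (l : List Int) :
    (let pairs : List Int := (List.range l.length).foldl (fun pairs j =>
        pairs ++ [(List.range j).foldl (fun c i =>
          if PySem.Int.mod (l.getD j 0) (l.getD i 0) == 0 then c + 1 else c) (0 : Int)]) [];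
      (List.range l.length).foldl (fun tot k =>
        (List.range k).foldl (fun tot j =>
          if PySem.Int.mod (l.getD k 0) (l.getD j 0) == 0 then tot + pairs.getD j 0 else tot) tot) 0)
    = ∑ j ∈ Finset.range l.length, fP l j * gP l j := by
  have hpairs : (List.range l.length).foldl (fun pairs j =>
        pairs ++ [(List.range j).foldl (fun c i =>
          if PySem.Int.mod (l.getD j 0) (l.getD i 0) == 0 then c + 1 else c) (0 : Int)]) []
      = (List.range l.length).map (fun j => fP l j) := by
    rw [PySem.List.foldl_append_singleton_eq_map]
    simp only [List.nil_append]
    refine List.map_congr_left (fun j _ => ?_)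
    rw [PySem.List.foldl_if_add_one, fP_eq_countP, zero_add]
  simp only [hpairs]
  simp only [foldl_if_add]
  rw [PySem.List.foldl_add, zero_add, ← sum_range_int, ← common_sum]
  refine Finset.sum_congr rfl (fun k hk => ?_)
  rw [← sum_range_int]
  refine Finset.sum_congr rfl (fun j hj => ?_)
  have hjn : j < l.length := by
    have := Finset.mem_range.mp hk
    have := Finset.mem_range.mp hj
    omega
  rw [PySem.List.getD_map_range _ _ _ _ hjn]

theorem guard_eq (l : List Int) :
    (decide (2 ≤ l.length) && decide (l.length ≤ 2000)
       && (match PySem.List.min? l (fun x => x) with | some m => decide (1 ≤ m) | none => false)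
       && (match PySem.List.max? l (fun x => x) with | some m => decide (m ≤ 999999) | none => false))
    = validation l := by
  unfold validation
  cases hmin : PySem.List.min? l (fun x => x) with
  | none =>
    have hnil : l = [] := (PySem.List.min?_eq_none_iff l _).mp hmin
    subst hnil
    simp [PySem.List.min?] at hmin ⊢
  | some m =>
    cases hmax : PySem.List.max? l (fun x => x) with
    | none =>
      have hnil : l = [] := (PySem.List.max?_eq_none_iff l _).mp hmax
      subst hnil
      simp [PySem.List.min?] at hmin
    | some M =>
      rw [Bool.eq_iff_iff]
      simp
      omega

theorem validation_len (l : List Int) (h : validation l = true) : 2 ≤ l.length := by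
  by_contra hlt
  have hd : decide (l.length < 2) = true := by simp at hlt ⊢; omega
  unfold validation at h
  rw [hd] at h
  simp at h

-- ===== VERDICT (by name: the statement is the Claim_ definition above) =====
theorem solution_spec : Claim_equal_solution := by
  intro l _
  show solution l = solution_alt l
  unfold solution solution_alt
  simp only [guard_eq]
  cases hv : validation l with
  | false => simp
  | true =>
      simp only [Bool.not_true, Bool.false_eq_true, if_false]
      exact (A_body l (validation_len l hv)).trans (B_body l).symm
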